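-- pv_equiv track=rewrite | github.com/shashanka300/Akshar_gema_kagle | finetune.py | _find_subseq
-- ===== SOURCE A (Python) =====
-- def _find_subseq(seq: list[int], subseq: list[int]) -> int:
--     """Return index of first occurrence of subseq in seq, or -1."""
--     n, m = len(seq), len(subseq)
--     if m == 0 or m > n:
--         return -1
--     for i in range(n - m + 1):
--         if seq[i : i + m] == subseq:
--             return i
--     return -1
-- ===== SOURCE B (Python) =====
-- def _find_subseq(seq: list[int], subseq: list[int]) -> int:
--     """Return index of first occurrence of subseq in seq, or -1 (Rabin-Karp rolling hash)."""
--     n, m = len(seq), len(subseq)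
--     if m == 0 or m > n:
--         return -1
--     MOD = (1 << 61) - 1
--     BASE = 131
--     hs = 0
--     for x in subseq:
--         hs = (hs * BASE + x) % MOD
--     hw = 0
--     for x in seq[:m]:
--         hw = (hw * BASE + x) % MOD
--     pw = 1
--     for _ in range(m - 1):
--         pw = pw * BASE % MOD
--     for i in range(n - m + 1):
--         if hw == hs and all(seq[i + j] == subseq[j] for j in range(m)):
--             return i
--         if i + m < n:
--             hw = ((hw - seq[i] * pw) * BASE + seq[i + m]) % MOD
--     return -1
-- ===== Notes on version B (the rewrite author's own statement) =====
-- stated objective: alternative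
-- what changed: Replaced the per-index slice comparison with Rabin-Karp: a rolling polynomial hash over a sliding window (mod 2^61-1), comparing slices only when the window hash matches the pattern hash.
import Mathlib
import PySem

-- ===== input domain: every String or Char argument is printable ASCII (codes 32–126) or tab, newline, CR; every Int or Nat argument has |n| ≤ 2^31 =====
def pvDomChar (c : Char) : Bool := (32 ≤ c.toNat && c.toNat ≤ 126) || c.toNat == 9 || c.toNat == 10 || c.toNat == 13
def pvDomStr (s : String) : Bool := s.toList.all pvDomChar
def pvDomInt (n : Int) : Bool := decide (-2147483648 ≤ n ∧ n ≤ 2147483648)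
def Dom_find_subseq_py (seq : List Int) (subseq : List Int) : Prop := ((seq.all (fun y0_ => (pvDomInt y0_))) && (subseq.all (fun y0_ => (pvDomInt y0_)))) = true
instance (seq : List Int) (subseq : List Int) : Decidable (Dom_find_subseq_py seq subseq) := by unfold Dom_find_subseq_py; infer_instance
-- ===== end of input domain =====

-- B replaces A's per-index slice comparison with a Rabin-Karp rolling window hash (alternative algorithm; no speed claim is made).

-- ===== PORT A =====
-- the 'for i in range(n - m + 1): if seq[i:i+m] == subseq: return i' loop of A
def pvALoop (seq : List Int) (subseq : List Int) (m : Int) : List Int → Int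
  | [] => -1
  | i :: rest =>
      if PySem.List.slice seq (some i) (some (i + m)) = subseq then i
      else pvALoop seq subseq m rest

def find_subseq_py (seq : List Int) (subseq : List Int) : Int :=
  let n : Int := seq.length
  let m : Int := subseq.length
  if m = 0 ∨ m > n then -1
  else pvALoop seq subseq m (PySem.List.pyRange 0 (n - m + 1) 1)

-- ===== PORT B =====
-- B's main loop: scan the candidate indices keeping the rolling window hash hw
def pvBLoop (seq : List Int) (subseq : List Int) (m hs pw : Int) : List Int → Int → Int
  | [], _ => -1
  | i :: rest, hw =>
      if hw = hs ∧ (PySem.List.pyRange 0 m 1).all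
          (fun j => PySem.List.pyGetD seq (i + j) 0 == PySem.List.pyGetD subseq j 0) = true then i
      else
        pvBLoop seq subseq m hs pw rest
          (if i + m < (seq.length : Int) then
             PySem.Int.mod ((hw - (PySem.List.pyGetD seq i 0) * pw) * 131
                             + PySem.List.pyGetD seq (i + m) 0) 2305843009213693951
           else hw)

def find_subseq_py_alt (seq : List Int) (subseq : List Int) : Int :=
  let n : Int := seq.length
  let m : Int := subseq.length
  if m = 0 ∨ m > n then -1
  else
    let hs := subseq.foldl (fun h x => PySem.Int.mod (h * 131 + x) 2305843009213693951) 0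
    let hw := (PySem.List.slice seq none (some m)).foldl
                (fun h x => PySem.Int.mod (h * 131 + x) 2305843009213693951) 0
    let pw := (PySem.List.pyRange 0 (m - 1) 1).foldl
                (fun p _ => PySem.Int.mod (p * 131) 2305843009213693951) 1
    pvBLoop seq subseq m hs pw (PySem.List.pyRange 0 (n - m + 1) 1) hw

-- ===== PRECONDITION & SPEC =====
def Spec_find_subseq_py (seq : List Int) (subseq : List Int) (out : Int) : Prop := out = find_subseq_py_alt seq subseq
instance (seq : List Int) (subseq : List Int) (out : Int) : Decidable (Spec_find_subseq_py seq subseq out) := by unfold Spec_find_subseq_py; infer_instance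

-- ===== CLAIM (what is proved, stated in full; the proofs are below) =====
def Claim_equal_find_subseq_py : Prop := ∀ (seq : List Int) (subseq : List Int), Dom_find_subseq_py seq subseq → Spec_find_subseq_py seq subseq (find_subseq_py seq subseq)

-- ===== LEMMAS AND PROOFS =====

-- the raw (un-modded) polynomial fold, used only in the proofs
def pvPoly (a : Int) : List Int → Int := List.foldl (fun h x => h * 131 + x) a

lemma pvPoly_cons (a x : Int) (l : List Int) : pvPoly a (x :: l) = pvPoly (a * 131 + x) l := rfl

lemma pvPoly_append_singleton (a b : Int) (l : List Int) :
    pvPoly a (l ++ [b]) = pvPoly a l * 131 + b := by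
  simp [pvPoly, List.foldl_append]

lemma pvPoly_acc (l : List Int) : ∀ a : Int, pvPoly a l = a * 131 ^ l.length + pvPoly 0 l := by
  induction l with
  | nil => intro a; simp [pvPoly]
  | cons x t ih =>
      intro a
      rw [pvPoly_cons, pvPoly_cons, ih (a * 131 + x), ih (0 * 131 + x),
          List.length_cons, pow_succ]
      ring

lemma pvPoly_congr_mod (l : List Int) :
    ∀ a b : Int, a % 2305843009213693951 = b % 2305843009213693951 →
      pvPoly a l % 2305843009213693951 = pvPoly b l % 2305843009213693951 := by
  induction l with
  | nil => intro a b h; simpa [pvPoly] using h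
  | cons x t ih =>
      intro a b h
      rw [pvPoly_cons, pvPoly_cons]
      exact ih _ _ ((Int.ModEq.mul_right 131 h).add_right x)

-- the modded hash fold used by port B equals the raw polynomial reduced mod M
lemma pvHash_eq_poly (l : List Int) :
    ∀ a : Int, a % 2305843009213693951 = a →
      l.foldl (fun h x => PySem.Int.mod (h * 131 + x) 2305843009213693951) a
        = pvPoly a l % 2305843009213693951 := by
  induction l with
  | nil => intro a ha; simpa [pvPoly] using ha.symm
  | cons x t ih =>
      intro a ha
      have hM : (0:Int) < 2305843009213693951 := by norm_num
      have hstep : PySem.Int.mod (a * 131 + x) 2305843009213693951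
          = (a * 131 + x) % 2305843009213693951 := PySem.Int.mod_eq_emod_of_pos hM
      show t.foldl _ (PySem.Int.mod (a * 131 + x) 2305843009213693951) = _
      rw [hstep, ih _ (Int.emod_emod_of_dvd _ dvd_rfl), pvPoly_cons]
      exact pvPoly_congr_mod t _ _ (Int.emod_emod_of_dvd _ dvd_rfl)

-- pw loop computes 131^(number of iterations) mod M
lemma pvPow_loop (l : List Int) :
    ∀ p : Int, p % 2305843009213693951 = p →
      l.foldl (fun p _ => PySem.Int.mod (p * 131) 2305843009213693951) p
        = p * 131 ^ l.length % 2305843009213693951 := by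
  induction l with
  | nil => intro p hp; simpa using hp.symm
  | cons x t ih =>
      intro p hp
      have hM : (0:Int) < 2305843009213693951 := by norm_num
      have hstep : PySem.Int.mod (p * 131) 2305843009213693951
          = (p * 131) % 2305843009213693951 := PySem.Int.mod_eq_emod_of_pos hM
      show t.foldl _ (PySem.Int.mod (p * 131) 2305843009213693951) = _
      rw [hstep, ih _ (Int.emod_emod_of_dvd _ dvd_rfl)]
      have h : ((p * 131) % 2305843009213693951) * 131 ^ t.length
               ≡ p * 131 ^ (t.length + 1) [ZMOD 2305843009213693951] := by
        calc ((p * 131) % 2305843009213693951) * 131 ^ t.length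
            ≡ (p * 131) * 131 ^ t.length [ZMOD 2305843009213693951] :=
              Int.ModEq.mul_right _ (Int.emod_emod_of_dvd _ dvd_rfl)
          _ = p * 131 ^ (t.length + 1) := by ring
      simpa using h

-- shorthand for the hash of a list (accumulator 0)
def pvHash (l : List Int) : Int :=
  l.foldl (fun h x => PySem.Int.mod (h * 131 + x) 2305843009213693951) 0

lemma pvHash_eq (l : List Int) : pvHash l = pvPoly 0 l % 2305843009213693951 :=
  pvHash_eq_poly l 0 (by norm_num)

-- the rolling-hash step: sliding the window one to the right
lemma pvRoll (a b : Int) (t : List Int) :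
    PySem.Int.mod ((pvHash (a :: t) - a * (131 ^ t.length % 2305843009213693951)) * 131 + b)
        2305843009213693951
      = pvHash (t ++ [b]) := by
  have hM : (0:Int) < 2305843009213693951 := by norm_num
  rw [PySem.Int.mod_eq_emod_of_pos hM, pvHash_eq (t ++ [b]), pvPoly_append_singleton]
  have h1 : pvHash (a :: t) ≡ a * 131 ^ t.length + pvPoly 0 t [ZMOD 2305843009213693951] := by
    rw [pvHash_eq]
    calc pvPoly 0 (a :: t) % 2305843009213693951
        ≡ pvPoly 0 (a :: t) [ZMOD 2305843009213693951] := Int.emod_emod_of_dvd _ dvd_rfl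
      _ = a * 131 ^ t.length + pvPoly 0 t := by
          rw [pvPoly_cons]
          simpa using pvPoly_acc t a
  have h2 : a * (131 ^ t.length % 2305843009213693951) ≡ a * 131 ^ t.length
      [ZMOD 2305843009213693951] := Int.ModEq.mul_left a (Int.emod_emod_of_dvd _ dvd_rfl)
  have h3 : (pvHash (a :: t) - a * (131 ^ t.length % 2305843009213693951)) * 131 + b
      ≡ pvPoly 0 t * 131 + b [ZMOD 2305843009213693951] := by
    calc (pvHash (a :: t) - a * (131 ^ t.length % 2305843009213693951)) * 131 + b
        ≡ ((a * 131 ^ t.length + pvPoly 0 t) - a * 131 ^ t.length) * 131 + b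
          [ZMOD 2305843009213693951] := ((h1.sub h2).mul_right 131).add_right b
      _ = pvPoly 0 t * 131 + b := by ring
  simpa using h3

-- the window at index k
def pvWin (seq : List Int) (m k : Nat) : List Int := (seq.drop k).take m

lemma pvWin_length (seq : List Int) (m k : Nat) (h : k + m ≤ seq.length) :
    (pvWin seq m k).length = m := by
  simp [pvWin]
  omega

lemma pvWin_cons (seq : List Int) (m k : Nat) (hm : 1 ≤ m) (hk : k < seq.length) :
    pvWin seq m k = seq[k] :: (seq.drop (k+1)).take (m - 1) := by
  obtain ⟨m', rfl⟩ : ∃ m', m = m' + 1 := ⟨m - 1, by omega⟩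
  rw [pvWin, List.drop_eq_getElem_cons hk, List.take_succ_cons]
  simp

lemma pvWin_snoc (seq : List Int) (m k : Nat) (hm : 1 ≤ m) (hk : k + m < seq.length) :
    pvWin seq m (k+1) = (seq.drop (k+1)).take (m - 1) ++ [seq[k + m]] := by
  obtain ⟨m', rfl⟩ : ∃ m', m = m' + 1 := ⟨m - 1, by omega⟩
  rw [pvWin, List.take_add_one, List.getElem?_drop,
      show k + 1 + m' = k + (m' + 1) from by omega,
      List.getElem?_eq_getElem (by omega)]
  simp

lemma pvGetD_nat (l : List Int) (j : Nat) (h : j < l.length) :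
    PySem.List.pyGetD l (j : Int) 0 = l[j] := by
  rw [PySem.List.pyGetD_natCast]; exact List.getD_eq_getElem _ _ h

lemma pvWin_getElem (seq : List Int) (m k j : Nat) (hkm : k + m ≤ seq.length) (hj : j < m) :
    (pvWin seq m k)[j]'(by rw [pvWin_length _ _ _ hkm]; exact hj) = seq[k + j]'(by omega) := by
  simp [pvWin, List.getElem_take, List.getElem_drop]

-- B's elementwise window check succeeds exactly when the window equals the pattern
lemma pvAll_iff (seq subseq : List Int) (k : Nat) (hkm : k + subseq.length ≤ seq.length) :
    (PySem.List.pyRange 0 (subseq.length : Int) 1).all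
        (fun j => PySem.List.pyGetD seq ((k : Int) + j) 0 == PySem.List.pyGetD subseq j 0)
      = true ↔ pvWin seq subseq.length k = subseq := by
  rw [PySem.List.pyRange_one,
      show ((subseq.length : Int) - 0).toNat = subseq.length from by omega,
      List.all_map, List.all_eq_true]
  have hlen : (pvWin seq subseq.length k).length = subseq.length := pvWin_length _ _ _ hkm
  constructor
  · intro hall
    apply List.ext_getElem (by omega)
    intro j hj1 hj2
    have h := hall j (List.mem_range.mpr (by omega))
    simp only [Function.comp_apply, beq_iff_eq] at h
    rw [show (0:Int) + (j:Int) = ((j:Nat):Int) from by ring,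
        show (k:Int) + ((j:Nat):Int) = (((k + j : Nat)):Int) from by push_cast; ring,
        pvGetD_nat seq _ (by omega), pvGetD_nat subseq _ (by omega)] at h
    rw [pvWin_getElem seq subseq.length k j hkm (by omega)]
    exact h
  · intro heq j hj
    have hj' : j < subseq.length := List.mem_range.mp hj
    simp only [Function.comp_apply, beq_iff_eq]
    rw [show (0:Int) + (j:Int) = ((j:Nat):Int) from by ring,
        show (k:Int) + ((j:Nat):Int) = (((k + j : Nat)):Int) from by push_cast; ring,
        pvGetD_nat seq _ (by omega), pvGetD_nat subseq _ (by omega),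
        ← pvWin_getElem seq subseq.length k j hkm hj']
    simp only [heq]

-- the central loop equivalence: same scan, B carrying the rolling window hash
lemma pvLoop_eq (seq subseq : List Int) (hm1 : 1 ≤ subseq.length)
    (hmn : subseq.length ≤ seq.length) :
    ∀ (d k : Nat), seq.length - subseq.length - k ≤ d → k ≤ seq.length - subseq.length →
      pvALoop seq subseq (subseq.length : Int)
          (PySem.List.pyRange (k : Int) ((seq.length : Int) - (subseq.length : Int) + 1) 1)
        = pvBLoop seq subseq (subseq.length : Int) (pvHash subseq)
            (131 ^ (subseq.length - 1) % 2305843009213693951)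
            (PySem.List.pyRange (k : Int) ((seq.length : Int) - (subseq.length : Int) + 1) 1)
            (pvHash (pvWin seq subseq.length k)) := by
  intro d
  induction d using Nat.strong_induction_on with
  | _ d ih =>
    intro k hd hk
    have hcons : PySem.List.pyRange (k : Int) ((seq.length : Int) - (subseq.length : Int) + 1) 1
        = (k : Int) :: PySem.List.pyRange ((k : Int) + 1)
            ((seq.length : Int) - (subseq.length : Int) + 1) 1 :=
      PySem.List.pyRange_one_cons (by omega)
    rw [hcons]
    simp only [pvALoop, pvBLoop]
    have hslice : PySem.List.slice seq (some (k : Int)) (some ((k : Int) + (subseq.length : Int)))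
        = pvWin seq subseq.length k := by
      rw [PySem.List.slice_natCast_add]; rfl
    rw [hslice]
    by_cases hmatch : pvWin seq subseq.length k = subseq
    · rw [if_pos hmatch,
          if_pos ⟨by rw [hmatch], (pvAll_iff seq subseq k (by omega)).mpr hmatch⟩]
    · rw [if_neg hmatch,
          if_neg (fun hc => hmatch ((pvAll_iff seq subseq k (by omega)).mp hc.2))]
      by_cases hlt : k < seq.length - subseq.length
      · have hkmm : k + subseq.length < seq.length := by omega
        have hcond : (k : Int) + (subseq.length : Int) < (seq.length : Int) := by omega
        rw [if_pos hcond]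
        have hg1 : PySem.List.pyGetD seq (k : Int) 0 = seq[k]'(by omega) := by
          rw [PySem.List.pyGetD_natCast]
          exact List.getD_eq_getElem _ _ (by omega)
        have hg2 : PySem.List.pyGetD seq ((k : Int) + (subseq.length : Int)) 0
            = seq[k + subseq.length]'hkmm := by
          rw [show (k : Int) + (subseq.length : Int) = ((k + subseq.length : Nat) : Int) from by
                push_cast; ring,
              PySem.List.pyGetD_natCast]
          exact List.getD_eq_getElem _ _ (by omega)
        have ht : ((seq.drop (k+1)).take (subseq.length - 1)).length = subseq.length - 1 := by
          simp [List.length_take, List.length_drop]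
          omega
        have hw' : PySem.Int.mod
              ((pvHash (pvWin seq subseq.length k)
                  - PySem.List.pyGetD seq (k : Int) 0
                      * (131 ^ (subseq.length - 1) % 2305843009213693951)) * 131
                + PySem.List.pyGetD seq ((k : Int) + (subseq.length : Int)) 0)
              2305843009213693951
            = pvHash (pvWin seq subseq.length (k + 1)) := by
          have hroll := pvRoll (seq[k]'(by omega)) (seq[k + subseq.length]'hkmm)
            ((seq.drop (k+1)).take (subseq.length - 1))
          rw [ht] at hroll
          rw [hg1, hg2, pvWin_cons seq subseq.length k hm1 (by omega), hroll,
              ← pvWin_snoc seq subseq.length k hm1 hkmm]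
        rw [hw']
        rw [show (k : Int) + 1 = ((k + 1 : Nat) : Int) from by push_cast; ring]
        exact ih (d - 1) (by omega) (k + 1) (by omega) (by omega)
      · have hnil : PySem.List.pyRange ((k : Int) + 1)
            ((seq.length : Int) - (subseq.length : Int) + 1) 1 = [] :=
          PySem.List.pyRange_one_eq_nil (by omega)
        rw [hnil]
        simp only [pvALoop, pvBLoop]

-- ===== VERDICT (by name: the statement is the Claim_ definition above) =====
theorem find_subseq_py_spec : Claim_equal_find_subseq_py := by
  intro seq subseq _
  show find_subseq_py seq subseq = find_subseq_py_alt seq subseq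
  simp only [find_subseq_py, find_subseq_py_alt]
  by_cases h : (subseq.length : Int) = 0 ∨ (subseq.length : Int) > (seq.length : Int)
  · rw [if_pos h, if_pos h]
  · rw [if_neg h, if_neg h]
    have hm1 : 1 ≤ subseq.length := by omega
    have hmn : subseq.length ≤ seq.length := by omega
    have hhw : (PySem.List.slice seq none (some (subseq.length : Int))).foldl
          (fun h x => PySem.Int.mod (h * 131 + x) 2305843009213693951) 0
        = pvHash (pvWin seq subseq.length 0) := by
      rw [PySem.List.slice_to_natCast]
      simp [pvHash, pvWin]
    have hlen : (PySem.List.pyRange 0 ((subseq.length : Int) - 1) 1).length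
        = subseq.length - 1 := by
      rw [PySem.List.length_pyRange_one]; omega
    have hpw : (PySem.List.pyRange 0 ((subseq.length : Int) - 1) 1).foldl
          (fun p _ => PySem.Int.mod (p * 131) 2305843009213693951) 1
        = 131 ^ (subseq.length - 1) % 2305843009213693951 := by
      rw [pvPow_loop _ 1 (by norm_num), hlen, one_mul]
    rw [hhw, hpw]
    have h := pvLoop_eq seq subseq hm1 hmn (seq.length - subseq.length) 0 (by omega) (by omega)
    rw [show ((0:Nat):Int) = (0:Int) from by simp] at h
    exact h
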